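-- pv_equiv track=rewrite | github.com/BingqingCheng/cace | cace/modules/angular_tools.py | gen_lxlylz_combo
-- ===== SOURCE A (Python) =====
-- import itertools
--
-- def gen_lxlylz_combo(l_max, remove_zero=False):
--     all_lxlylz = []
--     if l_max <= 0:
--         return all_lxlylz
--     for lx, ly, lz in itertools.product(range(l_max+1), repeat=3):
--         l = lx + ly + lz
--         if l <= l_max:
--            if remove_zero and l == 0:
--                continue
--            all_lxlylz.append([lx, ly, lz, l])
--     return all_lxlylz
-- ===== SOURCE B (Python) =====
-- def gen_lxlylz_combo(l_max, remove_zero=False):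
--     if l_max <= 0:
--         return []
--
--     def tuples(k, budget):
--         # all k-tuples of non-negative ints with sum <= budget, lexicographic order
--         if k == 0:
--             return [[]]
--         return [[v] + rest
--                 for v in range(budget + 1)
--                 for rest in tuples(k - 1, budget - v)]
--
--     return [t + [sum(t)]
--             for t in tuples(3, l_max)
--             if not (remove_zero and sum(t) == 0)]
-- ===== Notes on version B (the rewrite author's own statement) =====
-- stated objective: alternative
-- what changed: Replaces A's flat scan of the full (l_max+1)^3 itertools.product cube filtered by l <= l_max with a recursive budget-bounded generator of k-tuples (only valid triples are ever produced), then appends the sum in one comprehension.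
import Mathlib
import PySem

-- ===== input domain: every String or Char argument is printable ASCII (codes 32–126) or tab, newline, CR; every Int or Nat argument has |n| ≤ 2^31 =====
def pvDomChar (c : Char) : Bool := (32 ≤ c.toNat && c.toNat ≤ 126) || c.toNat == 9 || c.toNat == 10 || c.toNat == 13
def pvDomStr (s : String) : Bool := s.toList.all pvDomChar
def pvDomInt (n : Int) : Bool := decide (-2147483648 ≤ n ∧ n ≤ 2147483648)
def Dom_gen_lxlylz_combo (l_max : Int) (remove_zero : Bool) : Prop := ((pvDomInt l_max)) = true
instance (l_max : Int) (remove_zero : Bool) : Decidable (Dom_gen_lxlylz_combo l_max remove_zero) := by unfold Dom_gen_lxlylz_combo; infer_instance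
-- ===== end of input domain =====

-- B replaces A's full-cube scan + filter by a recursive budget-bounded generator of k-tuples, producing only valid triples.

-- ===== PORT A =====
def gen_lxlylz_combo (l_max : Int) (remove_zero : Bool) : List (List Int) :=
  let all_lxlylz : List (List Int) := []
  if l_max ≤ 0 then all_lxlylz
  else
    (PySem.List.pyRange 0 (l_max + 1) 1).foldl (fun acc lx =>
      (PySem.List.pyRange 0 (l_max + 1) 1).foldl (fun acc ly =>
        (PySem.List.pyRange 0 (l_max + 1) 1).foldl (fun acc lz =>
          if lx + ly + lz ≤ l_max then
            if remove_zero && (lx + ly + lz == 0) then acc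
            else acc ++ [[lx, ly, lz, lx + ly + lz]]
          else acc) acc) acc) all_lxlylz

-- ===== PORT B =====
-- helper 'tuples(k, budget)': all k-tuples of non-negative ints with sum ≤ budget, lexicographic
def pvTuples (k : Nat) (budget : Int) : List (List Int) :=
  match k with
  | 0 => [[]]
  | Nat.succ k' =>
      (PySem.List.pyRange 0 (budget + 1) 1).flatMap (fun v =>
        (pvTuples k' (budget - v)).map (fun rest => v :: rest))

def gen_lxlylz_combo_alt (l_max : Int) (remove_zero : Bool) : List (List Int) :=
  if l_max ≤ 0 then []
  else
    ((pvTuples 3 l_max).filter (fun t => !(remove_zero && (t.sum == 0)))).map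
      (fun t => t ++ [t.sum])

-- ===== PRECONDITION & SPEC =====
def Spec_gen_lxlylz_combo (l_max : Int) (remove_zero : Bool) (out : List (List Int)) : Prop := out = gen_lxlylz_combo_alt l_max remove_zero
instance (l_max : Int) (remove_zero : Bool) (out : List (List Int)) : Decidable (Spec_gen_lxlylz_combo l_max remove_zero out) := by unfold Spec_gen_lxlylz_combo; infer_instance

-- ===== CLAIM (what is proved, stated in full; the proofs are below) =====
def Claim_equal_gen_lxlylz_combo : Prop := ∀ (l_max : Int) (remove_zero : Bool), Dom_gen_lxlylz_combo l_max remove_zero → Spec_gen_lxlylz_combo l_max remove_zero (gen_lxlylz_combo l_max remove_zero)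

-- ===== LEMMAS AND PROOFS =====

-- 'if c1: if c2: continue else append f(x)' loop = filter-then-map
theorem foldl_if_if_append {α β : Type} (xs : List α) (c1 c2 : α → Bool) (f : α → β)
    (acc : List β) :
    xs.foldl (fun acc x => if c1 x then (if c2 x then acc else acc ++ [f x]) else acc) acc
      = acc ++ (xs.filter (fun x => c1 x && !c2 x)).map f := by
  induction xs generalizing acc with
  | nil => simp
  | cons x t ih =>
    simp only [List.foldl_cons, List.filter_cons]
    by_cases h1 : c1 x <;> by_cases h2 : c2 x <;>
      simp [h1, h2, ih]

theorem filter_flatMap' {α β : Type} (l : List α) (f : α → List β) (p : β → Bool) :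
    (l.flatMap f).filter p = l.flatMap (fun a => (f a).filter p) := by
  induction l with
  | nil => simp
  | cons x t ih => simp [List.flatMap_cons, List.filter_append, ih]

theorem map_flatMap' {α β γ : Type} (l : List α) (f : α → List β) (g : β → γ) :
    (l.flatMap f).map g = l.flatMap (fun a => (f a).map g) := by
  induction l with
  | nil => simp
  | cons x t ih => simp [List.flatMap_cons, ih]

theorem flatMap_single {α β : Type} (l : List α) (f : α → β) :
    l.flatMap (fun a => [f a]) = l.map f := by
  induction l with
  | nil => rfl
  | cons x t ih => simp [List.flatMap_cons, ih]

-- B's recursive generator, unfolded to the three budget-bounded ranges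
theorem pvTuples_three (b : Int) :
    pvTuples 3 b
      = (PySem.List.pyRange 0 (b + 1) 1).flatMap (fun lx =>
          (PySem.List.pyRange 0 (b - lx + 1) 1).flatMap (fun ly =>
            (PySem.List.pyRange 0 (b - lx - ly + 1) 1).map (fun lz => [lx, ly, lz]))) := by
  simp only [pvTuples, map_flatMap', List.map_map]
  apply List.flatMap_congr
  intro lx _
  apply List.flatMap_congr
  intro ly _
  rw [show b - lx - ly = b - (lx + ly) by ring]
  simp [flatMap_single]

-- B = filtered budget-bounded flatMap form
theorem alt_flatMap (r : Int) (rz : Bool) (hr : ¬ r ≤ 0) :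
    gen_lxlylz_combo_alt r rz
      = (PySem.List.pyRange 0 (r + 1) 1).flatMap (fun lx =>
          (PySem.List.pyRange 0 (r - lx + 1) 1).flatMap (fun ly =>
            ((PySem.List.pyRange 0 (r - lx - ly + 1) 1).filter
                (fun lz => !(rz && (lx + ly + lz == 0)))).map
              (fun lz => [lx, ly, lz, lx + ly + lz]))) := by
  unfold gen_lxlylz_combo_alt
  simp only [hr, if_false, pvTuples_three, filter_flatMap', map_flatMap', List.filter_map,
    List.map_map]
  apply List.flatMap_congr; intro lx _
  apply List.flatMap_congr; intro ly _
  have hs : ∀ lz : Int, ([lx, ly, lz] : List Int).sum = lx + ly + lz := by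
    intro lz; simp [List.sum_cons]; ring
  congr 1
  · funext lz; simp [Function.comp, hs]
  · apply List.filter_congr; intro lz _; simp [Function.comp, hs]

-- ===== VERDICT =====
theorem gen_lxlylz_combo_spec : Claim_equal_gen_lxlylz_combo := by
  intro r rz _
  unfold Spec_gen_lxlylz_combo gen_lxlylz_combo
  by_cases hr : r ≤ 0
  · simp [hr, gen_lxlylz_combo_alt]
  · rw [alt_flatMap r rz hr]
    simp only [hr, if_false]
    -- step 1: turn A's innermost foldl into filter-then-map over the full range
    have step1 : ∀ (lx ly : Int) (acc : List (List Int)),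
        (PySem.List.pyRange 0 (r + 1) 1).foldl (fun acc lz =>
          if lx + ly + lz ≤ r then
            if rz && (lx + ly + lz == 0) then acc
            else acc ++ [[lx, ly, lz, lx + ly + lz]]
          else acc) acc
        = acc ++ ((PySem.List.pyRange 0 (r + 1) 1).filter
              (fun lz => decide (lx + ly + lz ≤ r) && !(rz && (lx + ly + lz == 0)))).map
            (fun lz => [lx, ly, lz, lx + ly + lz]) := by
      intro lx ly acc
      simpa using foldl_if_if_append (PySem.List.pyRange 0 (r + 1) 1)
        (fun lz => decide (lx + ly + lz ≤ r))
        (fun lz => rz && (lx + ly + lz == 0)) (fun lz => [lx, ly, lz, lx + ly + lz]) acc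
    -- step 2: inner filtered full range = budget-bounded range with only the zero filter
    have step2 : ∀ lx ly : Int, 0 ≤ lx → 0 ≤ ly →
        ((PySem.List.pyRange 0 (r + 1) 1).filter
            (fun lz => decide (lx + ly + lz ≤ r) && !(rz && (lx + ly + lz == 0))))
        = ((PySem.List.pyRange 0 (r - lx - ly + 1) 1).filter
            (fun lz => !(rz && (lx + ly + lz == 0)))) := by
      intro lx ly hx hy
      by_cases hb : lx + ly ≤ r
      · rw [PySem.List.pyRange_one_append 0 (r - lx - ly + 1) (r + 1) (by omega) (by omega),
            List.filter_append]
        have h2 : ((PySem.List.pyRange (r - lx - ly + 1) (r + 1) 1).filter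
            (fun lz => decide (lx + ly + lz ≤ r) && !(rz && (lx + ly + lz == 0)))) = [] := by
          rw [List.filter_eq_nil_iff]
          intro lz hlz
          rw [PySem.List.mem_pyRange_one] at hlz
          simp only [Bool.and_eq_true, decide_eq_true_eq]
          intro h; omega
        rw [h2, List.append_nil]
        apply List.filter_congr
        intro lz hlz
        rw [PySem.List.mem_pyRange_one] at hlz
        have : (decide (lx + ly + lz ≤ r)) = true := by simp; omega
        simp [this]
      · rw [PySem.List.pyRange_one_eq_nil (by omega : r - lx - ly + 1 ≤ 0)]
        simp only [List.filter_nil]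
        rw [List.filter_eq_nil_iff]
        intro lz hlz
        rw [PySem.List.mem_pyRange_one] at hlz
        simp only [Bool.and_eq_true, decide_eq_true_eq]
        intro h; omega
    -- step 3: drop the ly values beyond the budget (their inner list is empty)
    have step3 : ∀ lx : Int, 0 ≤ lx → lx ≤ r →
        (PySem.List.pyRange 0 (r + 1) 1).flatMap (fun ly =>
          ((PySem.List.pyRange 0 (r - lx - ly + 1) 1).filter
              (fun lz => !(rz && (lx + ly + lz == 0)))).map
            (fun lz => [lx, ly, lz, lx + ly + lz]))
        = (PySem.List.pyRange 0 (r - lx + 1) 1).flatMap (fun ly =>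
          ((PySem.List.pyRange 0 (r - lx - ly + 1) 1).filter
              (fun lz => !(rz && (lx + ly + lz == 0)))).map
            (fun lz => [lx, ly, lz, lx + ly + lz])) := by
      intro lx hx hxr
      rw [PySem.List.pyRange_one_append 0 (r - lx + 1) (r + 1) (by omega) (by omega),
          List.flatMap_append]
      have h2 : (PySem.List.pyRange (r - lx + 1) (r + 1) 1).flatMap (fun ly =>
          ((PySem.List.pyRange 0 (r - lx - ly + 1) 1).filter
              (fun lz => !(rz && (lx + ly + lz == 0)))).map
            (fun lz => [lx, ly, lz, lx + ly + lz])) = [] := by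
        rw [List.flatMap_eq_nil_iff]
        intro ly hly
        rw [PySem.List.mem_pyRange_one] at hly
        rw [PySem.List.pyRange_one_eq_nil (by omega : r - lx - ly + 1 ≤ 0)]
        simp
      rw [h2, List.append_nil]
    -- assemble
    have mid : ∀ (lx : Int) (acc : List (List Int)),
        (PySem.List.pyRange 0 (r + 1) 1).foldl (fun acc ly =>
          (PySem.List.pyRange 0 (r + 1) 1).foldl (fun acc lz =>
            if lx + ly + lz ≤ r then
              if rz && (lx + ly + lz == 0) then acc
              else acc ++ [[lx, ly, lz, lx + ly + lz]]
            else acc) acc) acc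
        = acc ++ (PySem.List.pyRange 0 (r + 1) 1).flatMap (fun ly =>
            ((PySem.List.pyRange 0 (r + 1) 1).filter
                (fun lz => decide (lx + ly + lz ≤ r) && !(rz && (lx + ly + lz == 0)))).map
              (fun lz => [lx, ly, lz, lx + ly + lz])) := by
      intro lx acc
      rw [show (fun (acc : List (List Int)) ly =>
            (PySem.List.pyRange 0 (r + 1) 1).foldl (fun acc lz =>
              if lx + ly + lz ≤ r then
                if rz && (lx + ly + lz == 0) then acc
                else acc ++ [[lx, ly, lz, lx + ly + lz]]
              else acc) acc)
          = (fun (acc : List (List Int)) ly => acc ++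
              ((PySem.List.pyRange 0 (r + 1) 1).filter
                  (fun lz => decide (lx + ly + lz ≤ r) && !(rz && (lx + ly + lz == 0)))).map
                (fun lz => [lx, ly, lz, lx + ly + lz]))
          from funext fun acc => funext fun ly => step1 lx ly acc]
      exact PySem.List.foldl_append_eq_flatMap _ _ _
    rw [show (fun (acc : List (List Int)) lx =>
          (PySem.List.pyRange 0 (r + 1) 1).foldl (fun acc ly =>
            (PySem.List.pyRange 0 (r + 1) 1).foldl (fun acc lz =>
              if lx + ly + lz ≤ r then
                if rz && (lx + ly + lz == 0) then acc
                else acc ++ [[lx, ly, lz, lx + ly + lz]]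
              else acc) acc) acc)
        = (fun (acc : List (List Int)) lx => acc ++
            (PySem.List.pyRange 0 (r + 1) 1).flatMap (fun ly =>
              ((PySem.List.pyRange 0 (r + 1) 1).filter
                  (fun lz => decide (lx + ly + lz ≤ r) && !(rz && (lx + ly + lz == 0)))).map
                (fun lz => [lx, ly, lz, lx + ly + lz])))
        from funext fun acc => funext fun lx => mid lx acc]
    rw [PySem.List.foldl_append_eq_flatMap]
    simp only [List.nil_append]
    apply List.flatMap_congr
    intro lx hlx
    rw [PySem.List.mem_pyRange_one] at hlx
    rw [← step3 lx (by omega) (by omega)]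
    apply List.flatMap_congr
    intro ly hly
    rw [PySem.List.mem_pyRange_one] at hly
    rw [step2 lx ly (by omega) (by omega)]
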